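-- pv_equiv track=rewrite | github.com/dengguojie/vue-element-admin | auto_schedule/python/lang/dynamic/schedule/reduce_schedule.py | _find_last_none_reduce_axis
-- ===== SOURCE A (Python) =====
-- def _find_last_none_reduce_axis(shape_before_reduce, reduce_axis_index):
--     """
--     :param shape_before_reduce:
--     :param reduce_axis_index:
--     :return:
--     """
--     # shape_before_reduce:(ak+1,rk,..,r2,a2,r1,a1) or (ak,rk,..,r2,a1,r1),
--     # find a1 position, a1 may contain continues axis
--     a1_end_index = None
--     for i in range(len(shape_before_reduce) - 1, -1, -1):
--         if i not in reduce_axis_index: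
--             a1_end_index = i
--             break
--     a1_start_index = a1_end_index
--     if a1_end_index is None:
--         return a1_start_index, a1_end_index
--     for i in range(a1_end_index, -1, -1):
--         if i in reduce_axis_index:
--             a1_start_index = i + 1
--             break
--         if i == 0:
--             a1_start_index = i
--
--     return a1_start_index, a1_end_index
-- ===== SOURCE B (Python) =====
-- def _find_last_none_reduce_axis(shape_before_reduce, reduce_axis_index):
--     """Single forward pass tracking the current run of non-reduce axes,
--     with the reduce indices put in a set once."""
--     reduce_set = set(reduce_axis_index)
--     a1_start_index = None
--     a1_end_index = None
--     prev_is_reduce = True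
--     for i in range(len(shape_before_reduce)):
--         if i in reduce_set:
--             prev_is_reduce = True
--         else:
--             if prev_is_reduce:
--                 a1_start_index = i
--             a1_end_index = i
--             prev_is_reduce = False
--     return a1_start_index, a1_end_index
-- ===== Notes on version B (the rewrite author's own statement) =====
-- stated objective: alternative
-- what changed: Replaced A's two backward membership-scanning loops (find the last non-reduce axis, then scan down again for the run's start) by one forward pass over the axes that tracks the current run of non-reduce axes with a previous-axis-was-reduce flag, the reduce indices hashed into a set once; it trades A's early exit on the backward scan for a single full forward pass.
import Mathlib
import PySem

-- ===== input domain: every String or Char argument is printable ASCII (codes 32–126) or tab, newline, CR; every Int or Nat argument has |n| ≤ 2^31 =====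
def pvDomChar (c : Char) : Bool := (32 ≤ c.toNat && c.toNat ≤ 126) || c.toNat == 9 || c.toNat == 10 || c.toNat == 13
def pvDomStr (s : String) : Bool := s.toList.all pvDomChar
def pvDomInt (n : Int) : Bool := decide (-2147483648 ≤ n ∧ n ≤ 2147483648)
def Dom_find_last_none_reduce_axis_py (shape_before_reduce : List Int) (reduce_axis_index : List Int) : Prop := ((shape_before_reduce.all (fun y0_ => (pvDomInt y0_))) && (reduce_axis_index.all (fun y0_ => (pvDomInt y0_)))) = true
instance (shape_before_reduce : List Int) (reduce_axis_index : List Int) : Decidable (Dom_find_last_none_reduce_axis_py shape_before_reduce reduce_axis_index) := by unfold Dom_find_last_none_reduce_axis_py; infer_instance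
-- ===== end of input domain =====

-- B replaces A's two backward membership-scanning loops by one forward pass with
-- a set of the reduce indices, tracking the current run of non-reduce axes
-- (objective: alternative decomposition).

-- ===== PORT A =====
-- first loop: 'for i in range(n-1,-1,-1): if i not in R: a1_end_index = i; break'
def aFindEnd (R : List Int) : List Int → Option Int
  | [] => none
  | i :: rest => if i ∈ R then aFindEnd R rest else some i

-- second loop: 'for i in range(a1_end_index,-1,-1): if i in R: start=i+1; break
--               if i == 0: start = i' (no break; i = 0 is the last iteration)
def aFindStart (R : List Int) (acc : Int) : List Int → Int
  | [] => acc
  | i :: rest => if i ∈ R then i + 1 else aFindStart R (if i = 0 then 0 else acc) rest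

def find_last_none_reduce_axis_py (shape_before_reduce : List Int) (reduce_axis_index : List Int) : Option Int × Option Int :=
  let n : Int := shape_before_reduce.length
  match aFindEnd reduce_axis_index (PySem.List.pyRange (n - 1) (-1) (-1)) with
  | none => (none, none)
  | some e =>
      (some (aFindStart reduce_axis_index e (PySem.List.pyRange e (-1) (-1))), some e)

-- ===== PORT B =====
-- state: (a1_start_index, a1_end_index, prev_is_reduce)
def bStep (R : List Int) (st : Option Int × Option Int × Bool) (i : Int) : Option Int × Option Int × Bool :=
  if i ∈ R then (st.1, st.2.1, true)
  else ((if st.2.2 then some i else st.1), some i, false)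

def find_last_none_reduce_axis_py_alt (shape_before_reduce : List Int) (reduce_axis_index : List Int) : Option Int × Option Int :=
  let reduce_set : PySem.Set Int := PySem.Set.ofList reduce_axis_index
  let st := (PySem.List.pyRange 0 (shape_before_reduce.length : Int) 1).foldl
              (bStep reduce_set) (none, none, true)
  (st.1, st.2.1)

-- ===== PRECONDITION & SPEC =====
def Spec_find_last_none_reduce_axis_py (shape_before_reduce : List Int) (reduce_axis_index : List Int) (out : Option Int × Option Int) : Prop := out = find_last_none_reduce_axis_py_alt shape_before_reduce reduce_axis_index
instance (shape_before_reduce : List Int) (reduce_axis_index : List Int) (out : Option Int × Option Int) : Decidable (Spec_find_last_none_reduce_axis_py shape_before_reduce reduce_axis_index out) := by unfold Spec_find_last_none_reduce_axis_py; infer_instance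

-- ===== CLAIM (what is proved, stated in full; the proofs are below) =====
def Claim_equal_find_last_none_reduce_axis_py : Prop := ∀ (shape_before_reduce : List Int) (reduce_axis_index : List Int), Dom_find_last_none_reduce_axis_py shape_before_reduce reduce_axis_index → Spec_find_last_none_reduce_axis_py shape_before_reduce reduce_axis_index (find_last_none_reduce_axis_py shape_before_reduce reduce_axis_index)

-- ===== LEMMAS AND PROOFS =====

-- A's first loop, abstracted over the length
def Aend (R : List Int) (n : Nat) : Option Int :=
  aFindEnd R (PySem.List.pyRange ((n : Int) - 1) (-1) (-1))

theorem Aend_zero (R : List Int) : Aend R 0 = none := by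
  simp [Aend, aFindEnd]

theorem Aend_succ (R : List Int) (n : Nat) :
    Aend R (n + 1) = if (n : Int) ∈ R then Aend R n else some n := by
  unfold Aend
  have h : ((n + 1 : Nat) : Int) - 1 = (n : Int) := by push_cast; ring
  rw [h, PySem.List.pyRange_neg_one_cons (by omega : (-1:Int) < (n : Int))]
  simp [aFindEnd]

theorem Aend_nonneg (R : List Int) (n : Nat) (e : Int) (h : Aend R n = some e) : 0 ≤ e := by
  induction n with
  | zero => rw [Aend_zero] at h; cases h
  | succ m ih =>
      rw [Aend_succ] at h
      split at h
      · exact ih h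
      · cases h; omega

-- A's second loop: the accumulator never matters when scanning from e ≥ 0
theorem aFindStart_acc (R : List Int) (n : Nat) (a b : Int) :
    aFindStart R a (PySem.List.pyRange (n : Int) (-1) (-1)) =
    aFindStart R b (PySem.List.pyRange (n : Int) (-1) (-1)) := by
  induction n generalizing a b with
  | zero =>
      rw [PySem.List.pyRange_neg_one_cons (by norm_num : (-1:Int) < (0:Nat))]
      simp only [Nat.cast_zero]
      rw [show (0:Int) - 1 = -1 by ring, PySem.List.pyRange_neg_one_eq_nil le_rfl]
      simp [aFindStart]
  | succ m ih =>
      rw [PySem.List.pyRange_neg_one_cons (by omega : (-1:Int) < ((m+1 : Nat) : Int))]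
      have h : ((m + 1 : Nat) : Int) - 1 = (m : Int) := by push_cast; ring
      simp only [aFindStart, h]
      split
      · rfl
      · split
        · omega
        · exact ih _ _

def Astart (R : List Int) (n : Nat) : Int :=
  aFindStart R 0 (PySem.List.pyRange (n : Int) (-1) (-1))

theorem Astart_zero (R : List Int) : Astart R 0 = if (0:Int) ∈ R then 1 else 0 := by
  unfold Astart
  rw [PySem.List.pyRange_neg_one_cons (by norm_num : (-1:Int) < (0:Nat))]
  simp only [Nat.cast_zero]
  rw [show (0:Int) - 1 = -1 by ring, PySem.List.pyRange_neg_one_eq_nil le_rfl]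
  simp [aFindStart]

theorem Astart_succ (R : List Int) (m : Nat) :
    Astart R (m + 1) = if ((m : Int) + 1) ∈ R then (m : Int) + 2 else Astart R m := by
  unfold Astart
  rw [PySem.List.pyRange_neg_one_cons (by omega : (-1:Int) < ((m+1 : Nat) : Int))]
  have h : ((m + 1 : Nat) : Int) - 1 = (m : Int) := by push_cast; ring
  simp only [aFindStart, h]
  push_cast
  split
  · ring_nf
  · split
    · omega
    · exact aFindStart_acc R m _ _

theorem Astart_mem (R : List Int) (m : Nat) (h : (m : Int) ∈ R) : Astart R m = (m : Int) + 1 := by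
  cases m with
  | zero =>
      rw [Astart_zero, if_pos (by simpa using h)]
      simp
  | succ k =>
      rw [Astart_succ, if_pos (by push_cast at h ⊢; exact h)]
      push_cast
      ring

-- B's fold, abstracted over the length
def Bfold (R : List Int) (n : Nat) : Option Int × Option Int × Bool :=
  (PySem.List.pyRange 0 (n : Int) 1).foldl (bStep R) (none, none, true)

theorem Bfold_succ (R : List Int) (n : Nat) :
    Bfold R (n + 1) = bStep R (Bfold R n) n := by
  unfold Bfold
  rw [show ((n + 1 : Nat) : Int) = (n : Int) + 1 by push_cast; ring,
      PySem.List.pyRange_one_succ_right (by positivity), List.foldl_append]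
  rfl

-- the loop invariant: B's state after n steps, in terms of A's two scans
theorem Bfold_eq (R : List Int) (n : Nat) :
    Bfold R n = ((Aend R n).map (fun e => Astart R e.toNat), Aend R n,
                  decide (n = 0 ∨ ((n : Int) - 1) ∈ R)) := by
  induction n with
  | zero =>
      unfold Bfold
      simp only [Nat.cast_zero]
      rw [PySem.List.pyRange_one_eq_nil le_rfl]
      simp [Aend_zero]
  | succ m ih =>
      rw [Bfold_succ, ih, Aend_succ]
      by_cases hm : (m : Int) ∈ R
      · simp [bStep, hm]
      · simp only [bStep, hm, if_false]
        cases m with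
        | zero =>
            simp only [Nat.cast_zero] at hm ⊢
            simp [Astart_zero, hm]
        | succ k =>
            have hcast : ((k + 1 : Nat) : Int) - 1 = (k : Int) := by push_cast; ring
            simp only [Nat.cast_add, Nat.cast_one]
            have ht : ((k : Int) + 1).toNat = k + 1 := by omega
            have hm' : ((k : Int) + 1) ∉ R := by push_cast at hm ⊢; exact hm
            by_cases hk : (k : Int) ∈ R
            · have h1 : Astart R (k + 1) = (k : Int) + 1 := by
                rw [Astart_succ, if_neg hm', Astart_mem R k hk]
              simp [hk, ht, h1, hm']
            · have h1 : Astart R (k + 1) = Astart R k := by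
                rw [Astart_succ, if_neg hm']
              simp [hk, ht, h1, hm', Aend_succ]

-- membership-only congruence: the helpers depend on R only through '∈ R'
theorem aFindEnd_congr (R S : List Int) (h : ∀ i : Int, i ∈ S ↔ i ∈ R) (l : List Int) :
    aFindEnd S l = aFindEnd R l := by
  induction l with
  | nil => rfl
  | cons i rest ih => simp only [aFindEnd, h i, ih]

theorem aFindStart_congr (R S : List Int) (h : ∀ i : Int, i ∈ S ↔ i ∈ R) (acc : Int) (l : List Int) :
    aFindStart S acc l = aFindStart R acc l := by
  induction l generalizing acc with
  | nil => rfl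
  | cons i rest ih => simp only [aFindStart, h i]; split <;> simp [ih]

-- ===== VERDICT (by name: the statement is the Claim_ definition above) =====
theorem find_last_none_reduce_axis_py_spec : Claim_equal_find_last_none_reduce_axis_py := by
  intro shape R _
  unfold Spec_find_last_none_reduce_axis_py
  simp only [find_last_none_reduce_axis_py, find_last_none_reduce_axis_py_alt]
  have hA : aFindEnd R (PySem.List.pyRange ((shape.length : Int) - 1) (-1) (-1)) =
      Aend R shape.length := rfl
  have hmem : ∀ i : Int, i ∈ (PySem.Set.ofList R : PySem.Set Int) ↔ i ∈ R := fun i =>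
    PySem.Set.mem_ofList R i
  have hBf : (PySem.List.pyRange 0 (shape.length : Int) 1).foldl
      (bStep (PySem.Set.ofList R)) (none, none, true) = Bfold (PySem.Set.ofList R) shape.length := rfl
  have hAe : Aend (PySem.Set.ofList R) shape.length = Aend R shape.length :=
    aFindEnd_congr R _ hmem _
  rw [hA, hBf, Bfold_eq, hAe]
  rcases hE : Aend R shape.length with _ | e
  · rfl
  · have he : 0 ≤ e := Aend_nonneg R shape.length e hE
    have he' : ((e.toNat : Nat) : Int) = e := Int.toNat_of_nonneg he
    simp only [Option.map_some]
    rw [show Astart (PySem.Set.ofList R) e.toNat = Astart R e.toNat from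
          aFindStart_congr R _ hmem 0 _,
        show aFindStart R e (PySem.List.pyRange e (-1) (-1)) =
          aFindStart R e (PySem.List.pyRange ((e.toNat : Nat) : Int) (-1) (-1)) by rw [he'],
        aFindStart_acc R e.toNat e 0]
    rfl
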